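-- pv_equiv track=rewrite | github.com/RaintL23/foundry_vtt_actors_helper_for_dnd5e | app/items/items_service.py | get_item_entries
-- ===== SOURCE A (Python) =====
-- def get_item_entries(entries):
--     """."""
--     description = ""
--     for entrie in entries:
--         description += "\n"
--         if isinstance(entrie, str):
--             description += entrie
--         elif isinstance(entrie, list):
--             description += get_item_entries(entrie)
--
--     return description
-- ===== SOURCE B (Python) =====
-- def get_item_entries(entries):
--     """."""
--     if not entries:
--         return ""
--     return "\n" + "\n".join(entries)
-- ===== Notes on version B (the rewrite author's own statement) =====
-- stated objective: simpler
-- what changed: Replaces the element-by-element accumulating concatenation loop with a single str.join prefixed by one newline (empty input short-circuits to the empty string).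
import Mathlib
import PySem

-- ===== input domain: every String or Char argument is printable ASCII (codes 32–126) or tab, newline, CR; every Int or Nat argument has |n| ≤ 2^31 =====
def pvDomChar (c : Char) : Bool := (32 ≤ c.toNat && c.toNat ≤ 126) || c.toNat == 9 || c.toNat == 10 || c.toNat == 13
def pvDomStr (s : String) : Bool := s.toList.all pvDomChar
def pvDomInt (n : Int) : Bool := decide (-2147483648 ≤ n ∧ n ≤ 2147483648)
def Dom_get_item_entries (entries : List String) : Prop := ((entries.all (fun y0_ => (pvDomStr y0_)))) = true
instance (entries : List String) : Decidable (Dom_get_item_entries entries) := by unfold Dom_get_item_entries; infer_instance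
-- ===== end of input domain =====

-- B replaces A's accumulating concatenation loop by a single "\n".join prefixed with one newline (simpler).

-- ===== PORT A =====
-- A loops over the entries, appending "\n" then the entry to an accumulator string.
-- (On List String inputs A's isinstance(entrie, list) branch never fires.)
def get_item_entries (entries : List String) : String :=
  entries.foldl (fun description entrie => description ++ "\n" ++ entrie) ""

-- ===== PORT B =====
-- B: empty list gives "", otherwise one newline followed by "\n".join(entries).
def get_item_entries_alt (entries : List String) : String :=
  match entries with
  | [] => ""
  | _ => "\n" ++ PySem.Str.join "\n" entries

-- ===== PRECONDITION & SPEC =====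
def Spec_get_item_entries (entries : List String) (out : String) : Prop := out = get_item_entries_alt entries
instance (entries : List String) (out : String) : Decidable (Spec_get_item_entries entries out) := by unfold Spec_get_item_entries; infer_instance

-- ===== CLAIM (what is proved, stated in full; the proofs are below) =====
def Claim_equal_get_item_entries : Prop := ∀ (entries : List String), Dom_get_item_entries entries → Spec_get_item_entries entries (get_item_entries entries)

-- ===== LEMMAS AND PROOFS =====

-- A's loop, on the character level: each entry contributes '\n' followed by its characters.
theorem pv_fold_toList (l : List String) (acc : String) :
    (l.foldl (fun description entrie => description ++ "\n" ++ entrie) acc).toList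
      = acc.toList ++ l.flatMap (fun e => '\n' :: e.toList) := by
  induction l generalizing acc with
  | nil => simp
  | cons e rest ih => simp [ih, List.append_assoc]

-- A leading newline plus "\n"-intercalation is exactly one '\n' before each part.
theorem pv_join_flat (parts : List (List Char)) (h : parts ≠ []) :
    '\n' :: PySem.Chars.join ['\n'] parts = parts.flatMap (fun p => '\n' :: p) := by
  induction parts with
  | nil => exact absurd rfl h
  | cons p rest ih =>
    cases rest with
    | nil => simp [PySem.Chars.join, List.intercalate]
    | cons q rest' =>
      rw [PySem.Chars.join_cons_cons]
      simp only [List.flatMap_cons] at ih ⊢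
      rw [← ih (by simp)]
      simp

-- ===== VERDICT (by name: the statement is the Claim_ definition above) =====
theorem get_item_entries_spec : Claim_equal_get_item_entries := by
  intro entries _
  unfold Spec_get_item_entries get_item_entries get_item_entries_alt
  cases entries with
  | nil => rfl
  | cons e rest =>
    apply String.toList_injective
    rw [pv_fold_toList]
    have h := pv_join_flat ((e :: rest).map String.toList) (by simp)
    simp only [List.flatMap_map] at h
    simp [PySem.Str.toList_join, ← h]
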